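-- pv_equiv track=rewrite | github.com/ELITR/SLTev | SLTev/SLTev-erasure.py | splitInputsHypos
-- ===== SOURCE A (Python) =====
-- def splitInputsHypos(inputs, format_orders):
--     """
--     splitting inputs and hypothesis
--
--     :param inputs: a list of the input file paths
--     :param format_orders: a list of input formats in order
--     :return hypos: a list of the hypothesis files [[hypo_path, format], []]
--     :return gold_inputs: a list of the gold input files [{format:[file1, ...], ...}, {format:[file1, ...], ...},]
--     """
--
--     hypos = list()
--     gold_inputs = list()
--     temp = {}
--     for inp, ords in zip(inputs, format_orders):
--         if ords in ['asrt', 'asr', 'slt', 'mt']: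
--             hypos.append([inp, ords])
--
--         else:
--             if inp == 'and' and ords == 'and':
--                 gold_inputs.append(temp)
--                 temp = {}
--             else:
--                 try:
--                     temp[ords].append(inp)
--                 except:
--                     temp[ords] = [inp]
--     if temp != {}:
--         gold_inputs.append(temp)
--
--     return hypos, gold_inputs
-- ===== SOURCE B (Python) =====
-- def _route(seg):
--     hs = []
--     d = {}
--     for inp, ords in seg:
--         if ords in ('asrt', 'asr', 'slt', 'mt'):
--             hs.append([inp, ords])
--         else:
--             d.setdefault(ords, []).append(inp)
--     return hs, d
--
--
-- def splitInputsHypos(inputs, format_orders):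
--     # split the zipped pairs into segments at each ('and','and') separator
--     closed_segs = []
--     current = []
--     for p in zip(inputs, format_orders):
--         if p == ('and', 'and'):
--             closed_segs.append(current)
--             current = []
--         else:
--             current.append(p)
--     hypos = []
--     gold_inputs = []
--     for seg in closed_segs:
--         hs, d = _route(seg)
--         hypos += hs
--         gold_inputs.append(d)
--     hs, d = _route(current)
--     hypos += hs
--     if d:
--         gold_inputs.append(d)
--     return hypos, gold_inputs
-- ===== Notes on version B (the rewrite author's own statement) =====
-- stated objective: alternative
-- what changed: A interleaves separator handling, hypothesis routing and gold grouping in one loop over one mutable dict; B first splits the zipped pairs into segments at each ('and','and') separator and then routes each segment independently into the flat hypothesis list and its own per-segment dict.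
import Mathlib
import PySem

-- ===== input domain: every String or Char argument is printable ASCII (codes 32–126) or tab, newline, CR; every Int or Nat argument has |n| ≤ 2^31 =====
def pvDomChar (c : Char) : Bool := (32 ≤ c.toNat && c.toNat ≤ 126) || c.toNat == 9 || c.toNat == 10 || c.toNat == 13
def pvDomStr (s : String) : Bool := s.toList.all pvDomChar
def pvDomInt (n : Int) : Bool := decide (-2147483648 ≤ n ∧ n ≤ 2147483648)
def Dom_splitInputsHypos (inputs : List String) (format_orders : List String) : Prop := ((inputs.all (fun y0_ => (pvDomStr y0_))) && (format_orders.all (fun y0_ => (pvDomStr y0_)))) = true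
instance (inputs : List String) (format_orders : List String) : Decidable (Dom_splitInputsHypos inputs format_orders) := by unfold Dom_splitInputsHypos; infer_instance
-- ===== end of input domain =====

-- B splits the zipped pairs into separator-delimited segments first, then routes each
-- segment independently (objective: alternative decomposition, same cost).


-- ===== PORT A =====
def pvHypoFmt (s : String) : Bool := s == "asrt" || s == "asr" || s == "slt" || s == "mt"

-- A's single loop: state (hypos, gold, temp); `try temp[ords].append(inp) except temp[ords]=[inp]`
-- is exactly Dict.modify ords [] (· ++ [inp]).
def pvALoop : List (String × String) → List (List String) → List (List (String × List String)) → PySem.Dict String (List String) → List (List String) × List (List (String × List String)) × PySem.Dict String (List String)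
  | [], hypos, gold, temp => (hypos, gold, temp)
  | (inp, ords) :: rest, hypos, gold, temp =>
    if pvHypoFmt ords then pvALoop rest (hypos ++ [[inp, ords]]) gold temp
    else if inp == "and" && ords == "and" then
      pvALoop rest hypos (gold ++ [temp.items]) PySem.Dict.empty
    else pvALoop rest hypos gold (temp.modify ords [] (· ++ [inp]))

-- the final `if temp != {}: gold_inputs.append(temp)`
def pvAFlush (s : List (List String) × List (List (String × List String)) × PySem.Dict String (List String)) : List (List String) × List (List (String × List String)) :=
  (s.1, if s.2.2.items ≠ [] then s.2.1 ++ [s.2.2.items] else s.2.1)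

def splitInputsHypos (inputs : List String) (format_orders : List String) : List (List String) × (List (List (String × List String))) :=
  pvAFlush (pvALoop (inputs.zip format_orders) [] [] PySem.Dict.empty)

-- ===== PORT B =====
-- segmentation loop of Source B: accumulate closed segments and the current segment
def pvSplitLoop : List (String × String) → List (List (String × String)) → List (String × String) → List (List (String × String)) × List (String × String)
  | [], cs, cur => (cs, cur)
  | p :: rest, cs, cur =>
    if p.1 == "and" && p.2 == "and" then pvSplitLoop rest (cs ++ [cur]) []
    else pvSplitLoop rest cs (cur ++ [p])

-- Source B's _route loop over one segment
def pvRoute : List (String × String) → List (List String) → PySem.Dict String (List String) → List (List String) × PySem.Dict String (List String)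
  | [], hs, d => (hs, d)
  | (inp, ords) :: rest, hs, d =>
    if pvHypoFmt ords then pvRoute rest (hs ++ [[inp, ords]]) d
    else pvRoute rest hs (d.modify ords [] (· ++ [inp]))

def pvStepB (hg : List (List String) × List (List (String × List String))) (seg : List (String × String)) : List (List String) × List (List (String × List String)) :=
  (hg.1 ++ (pvRoute seg [] PySem.Dict.empty).1, hg.2 ++ [(pvRoute seg [] PySem.Dict.empty).2.items])

def splitInputsHypos_alt (inputs : List String) (format_orders : List String) : List (List String) × (List (List (String × List String))) :=
  let s := pvSplitLoop (inputs.zip format_orders) [] []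
  let hg := s.1.foldl pvStepB ([], [])
  let r := pvRoute s.2 [] PySem.Dict.empty
  (hg.1 ++ r.1, if r.2.items ≠ [] then hg.2 ++ [r.2.items] else hg.2)

-- ===== PRECONDITION & SPEC =====
def Spec_splitInputsHypos (inputs : List String) (format_orders : List String) (out : List (List String) × (List (List (String × List String)))) : Prop := out = splitInputsHypos_alt inputs format_orders
instance (inputs : List String) (format_orders : List String) (out : List (List String) × (List (List (String × List String)))) : Decidable (Spec_splitInputsHypos inputs format_orders out) := by unfold Spec_splitInputsHypos; infer_instance

-- ===== CLAIM (what is proved, stated in full; the proofs are below) =====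
def Claim_equal_splitInputsHypos : Prop := ∀ (inputs : List String) (format_orders : List String), Dom_splitInputsHypos inputs format_orders → Spec_splitInputsHypos inputs format_orders (splitInputsHypos inputs format_orders)

-- ===== LEMMAS AND PROOFS =====

-- proof-side front-recursive segmentation
def pvSplit : List (String × String) → List (List (String × String)) × List (String × String)
  | [] => ([], [])
  | p :: rest =>
    if p.1 == "and" && p.2 == "and" then ([] :: (pvSplit rest).1, (pvSplit rest).2)
    else match (pvSplit rest).1 with
      | c :: cs' => ((p :: c) :: cs', (pvSplit rest).2)
      | [] => ([], p :: (pvSplit rest).2)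

def pvPre (cur : List (String × String)) (s : List (List (String × String)) × List (String × String)) : List (List (String × String)) × List (String × String) :=
  match s.1 with
  | [] => ([], cur ++ s.2)
  | c :: t => ((cur ++ c) :: t, s.2)

theorem pvPre_nil (s : List (List (String × String)) × List (String × String)) : pvPre [] s = s := by
  obtain ⟨csl, last⟩ := s
  cases csl with
  | nil => simp [pvPre]
  | cons c t => simp [pvPre]

theorem pvSplitLoop_eq : ∀ (ps : List (String × String)) (cs : List (List (String × String))) (cur : List (String × String)),
    pvSplitLoop ps cs cur = (cs ++ (pvPre cur (pvSplit ps)).1, (pvPre cur (pvSplit ps)).2) := by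
  intro ps
  induction ps with
  | nil => intro cs cur; simp [pvSplitLoop, pvSplit, pvPre]
  | cons p rest ih =>
    intro cs cur
    by_cases hsep : (p.1 == "and" && p.2 == "and") = true
    · have e1 : pvSplitLoop (p :: rest) cs cur = pvSplitLoop rest (cs ++ [cur]) [] := by
        simp [pvSplitLoop, hsep]
      have e2 : pvSplit (p :: rest) = ([] :: (pvSplit rest).1, (pvSplit rest).2) := by
        simp [pvSplit, hsep]
      rw [e1, e2, ih]
      cases h : (pvSplit rest).1 with
      | nil => simp [pvPre, h]
      | cons c t => simp [pvPre, h]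
    · have e1 : pvSplitLoop (p :: rest) cs cur = pvSplitLoop rest cs (cur ++ [p]) := by
        simp [pvSplitLoop, hsep]
      rw [e1, ih]
      cases h : (pvSplit rest).1 with
      | nil =>
        have e2 : pvSplit (p :: rest) = ([], p :: (pvSplit rest).2) := by
          simp [pvSplit, hsep, h]
        rw [e2]; simp [pvPre, h]
      | cons c t =>
        have e2 : pvSplit (p :: rest) = ((p :: c) :: t, (pvSplit rest).2) := by
          simp [pvSplit, hsep, h]
        rw [e2]; simp [pvPre, h]

theorem pvSplitLoop_nil_nil (ps : List (String × String)) : pvSplitLoop ps [] [] = pvSplit ps := by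
  rw [pvSplitLoop_eq, pvPre_nil]
  simp

-- routing with a hypothesis accumulator prepends the accumulator
theorem pvRoute_acc : ∀ (seg : List (String × String)) (h : List (List String)) (t : PySem.Dict String (List String)),
    pvRoute seg h t = (h ++ (pvRoute seg [] t).1, (pvRoute seg [] t).2) := by
  intro seg
  induction seg with
  | nil => intro h t; simp [pvRoute]
  | cons p rest ih =>
    intro h t
    obtain ⟨inp, ords⟩ := p
    by_cases hh : pvHypoFmt ords = true
    · have e : ∀ (h' : List (List String)), pvRoute ((inp, ords) :: rest) h' t = pvRoute rest (h' ++ [[inp, ords]]) t := by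
        intro h'; simp [pvRoute, hh]
      rw [e h, e [], ih (h ++ [[inp, ords]]) t, ih ([] ++ [[inp, ords]]) t]
      simp
    · have e : ∀ (h' : List (List String)), pvRoute ((inp, ords) :: rest) h' t = pvRoute rest h' (t.modify ords [] (· ++ [inp])) := by
        intro h'; simp [pvRoute, hh]
      rw [e h, e [], ih h _]

-- the B-side processor that the proof threads A's state through
def pvBproc : List (List (String × String)) → List (String × String) → List (List String) → List (List (String × List String)) → PySem.Dict String (List String) → List (List String) × List (List (String × List String))
  | [], last, h, g, t =>
    ((pvRoute last h t).1, if (pvRoute last h t).2.items ≠ [] then g ++ [(pvRoute last h t).2.items] else g)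
  | c :: cs, last, h, g, t =>
    pvBproc cs last (pvRoute c h t).1 (g ++ [(pvRoute c h t).2.items]) PySem.Dict.empty

theorem pvFold_eq : ∀ (cs : List (List (String × String))) (last : List (String × String)) (h : List (List String)) (g : List (List (String × List String))),
    ((cs.foldl pvStepB (h, g)).1 ++ (pvRoute last [] PySem.Dict.empty).1,
      if (pvRoute last [] PySem.Dict.empty).2.items ≠ [] then (cs.foldl pvStepB (h, g)).2 ++ [(pvRoute last [] PySem.Dict.empty).2.items] else (cs.foldl pvStepB (h, g)).2)
    = pvBproc cs last h g PySem.Dict.empty := by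
  intro cs
  induction cs with
  | nil =>
    intro last h g
    simp only [List.foldl_nil, pvBproc]
    rw [pvRoute_acc last h PySem.Dict.empty]
  | cons c cs ih =>
    intro last h g
    simp only [List.foldl_cons, pvBproc, pvStepB]
    rw [ih]
    rw [pvRoute_acc c h PySem.Dict.empty]

theorem pvMain : ∀ (ps : List (String × String)) (h : List (List String)) (g : List (List (String × List String))) (t : PySem.Dict String (List String)),
    pvAFlush (pvALoop ps h g t) = pvBproc (pvSplit ps).1 (pvSplit ps).2 h g t := by
  intro ps
  induction ps with
  | nil => intro h g t; simp [pvALoop, pvSplit, pvBproc, pvRoute, pvAFlush]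
  | cons p rest ih =>
    intro h g t
    obtain ⟨inp, ords⟩ := p
    by_cases hh : pvHypoFmt ords = true
    · -- hypothesis entry: not a separator since pvHypoFmt "and" = false
      have hords : ords ≠ "and" := by
        intro e; rw [e] at hh; exact absurd hh (by decide)
      have hsep : ((inp, ords).1 == "and" && (inp, ords).2 == "and") = false := by
        simp only [Bool.and_eq_false_iff]; right; simp [hords]
      have eA : pvALoop ((inp, ords) :: rest) h g t = pvALoop rest (h ++ [[inp, ords]]) g t := by
        simp [pvALoop, hh]
      rw [eA, ih]
      cases hc : (pvSplit rest).1 with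
      | nil =>
        have eS : pvSplit ((inp, ords) :: rest) = ([], (inp, ords) :: (pvSplit rest).2) := by
          simp [pvSplit, hsep, hc]
        rw [eS]
        simp [pvBproc, pvRoute, hh]
      | cons c cs' =>
        have eS : pvSplit ((inp, ords) :: rest) = (((inp, ords) :: c) :: cs', (pvSplit rest).2) := by
          simp [pvSplit, hsep, hc]
        rw [eS]
        simp [pvBproc, pvRoute, hh]
    · by_cases hsep : (inp == "and" && ords == "and") = true
      · -- separator
        have eA : pvALoop ((inp, ords) :: rest) h g t = pvALoop rest h (g ++ [t.items]) PySem.Dict.empty := by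
          simp [pvALoop, hh, hsep]
        have eS : pvSplit ((inp, ords) :: rest) = ([] :: (pvSplit rest).1, (pvSplit rest).2) := by
          simp [pvSplit, hsep]
        rw [eA, ih, eS]
        simp only [pvBproc, pvRoute]
      · -- gold entry
        have eA : pvALoop ((inp, ords) :: rest) h g t = pvALoop rest h g (t.modify ords [] (· ++ [inp])) := by
          simp [pvALoop, hh, hsep]
        rw [eA, ih]
        cases hc : (pvSplit rest).1 with
        | nil =>
          have eS : pvSplit ((inp, ords) :: rest) = ([], (inp, ords) :: (pvSplit rest).2) := by
            simp [pvSplit, hsep, hc]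
          rw [eS]
          simp [pvBproc, pvRoute, hh]
        | cons c cs' =>
          have eS : pvSplit ((inp, ords) :: rest) = (((inp, ords) :: c) :: cs', (pvSplit rest).2) := by
            simp [pvSplit, hsep, hc]
          rw [eS]
          simp [pvBproc, pvRoute, hh]

-- ===== VERDICT (by name: the statement is the Claim_ definition above) =====
theorem splitInputsHypos_spec : Claim_equal_splitInputsHypos := by
  intro inputs format_orders _
  unfold Spec_splitInputsHypos splitInputsHypos splitInputsHypos_alt
  rw [pvSplitLoop_nil_nil, pvMain]
  exact (pvFold_eq _ _ [] []).symm
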